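-- pv_equiv track=rewrite | github.com/QuoVadis86/mashangpa | 8.py | m_crypt
-- ===== SOURCE A (Python) =====
-- def m_crypt(data: str, key: str):
--     key_len = len(key)
--     encrypted = []
--
--     # 分组处理
--     for i in range(0, len(data), 4):
--         group = data[i : i + 4]
--         encrypted_group = []
--
--         for j in range(len(group)):
--             # 字符相加取模
--             code = (ord(group[j]) + ord(key[j % key_len])) % 256
--             encrypted_group.append(code)
--
--         encrypted.extend(encrypted_group)
--
--     # 转为16进制字符串
--     hex_str = "".join(f"{b:02x}" for b in encrypted)
--     return hex_str
-- ===== SOURCE B (Python) =====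
-- def m_crypt(data: str, key: str):
--     key_len = len(key)
--     return "".join(
--         f"{(ord(c) + ord(key[(p % 4) % key_len])) % 256:02x}"
--         for p, c in enumerate(data)
--     )
-- ===== Notes on version B (the rewrite author's own statement) =====
-- stated objective: simpler
-- what changed: Replaced A's nested loops (slice data into 4-char groups, inner index loop into a per-group list, extend an accumulator, then join) by a single flat pass over enumerate(data) that hex-formats each byte directly, using that the in-group index equals p % 4, so key index is (p % 4) % key_len.
import Mathlib
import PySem

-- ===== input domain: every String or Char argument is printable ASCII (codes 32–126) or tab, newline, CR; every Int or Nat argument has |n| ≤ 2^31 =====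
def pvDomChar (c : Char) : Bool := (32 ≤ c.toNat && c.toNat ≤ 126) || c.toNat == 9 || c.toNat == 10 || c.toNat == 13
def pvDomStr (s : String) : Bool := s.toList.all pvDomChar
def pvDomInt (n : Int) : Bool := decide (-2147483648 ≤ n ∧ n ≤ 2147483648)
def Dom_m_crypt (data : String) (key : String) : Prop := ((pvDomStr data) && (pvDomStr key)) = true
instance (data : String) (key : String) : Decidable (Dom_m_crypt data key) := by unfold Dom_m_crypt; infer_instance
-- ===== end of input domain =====

-- B replaces A's nested group-of-4 loops (slice into groups, inner index loop, extend)
-- by one flat pass over enumerate(data), using that the in-group index is p % 4 (objective: simpler).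

-- f"{b:02x}" for 0 ≤ b < 256 (the only values either program formats: x % 256): two lowercase hex digits
def pvHexDigit (n : Nat) : Char := if n < 10 then Char.ofNat (48 + n) else Char.ofNat (87 + n)
def pvByteHex (b : Int) : String := String.ofList [pvHexDigit (b.toNat / 16), pvHexDigit (b.toNat % 16)]

-- ===== PORT A =====
def m_crypt (data : String) (key : String) : String :=
  let dl := data.toList
  let kl := key.toList
  let keyLen : Int := PySem.List.len kl
  let encrypted : List Int :=
    (PySem.List.pyRange 0 (PySem.List.len dl) 4).foldl (fun acc i =>
      let group := PySem.List.slice dl (some i) (some (i + 4))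
      let encryptedGroup : List Int :=
        (PySem.List.pyRange 0 (PySem.List.len group) 1).foldl (fun eg j =>
          eg ++ [PySem.Int.mod (((PySem.List.pyGetD group j ' ').toNat : Int)
                  + ((PySem.List.pyGetD kl (PySem.Int.mod j keyLen) ' ').toNat : Int)) 256]) []
      acc ++ encryptedGroup) []
  PySem.Str.join "" (encrypted.map pvByteHex)

-- ===== PORT B =====
def m_crypt_alt (data : String) (key : String) : String :=
  let kl := key.toList
  let keyLen : Int := PySem.List.len kl
  PySem.Str.join "" ((PySem.List.enumerate data.toList).map (fun pc =>
    pvByteHex (PySem.Int.mod ((pc.2.toNat : Int)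
      + ((PySem.List.pyGetD kl (PySem.Int.mod (PySem.Int.mod pc.1 4) keyLen) ' ').toNat : Int)) 256)))

-- ===== PRECONDITION & SPEC =====
-- Pre_ excludes only an empty key together with nonempty data: there Python's 'j % key_len'
-- raises ZeroDivisionError in A (and B raises the same way).
def Pre_m_crypt (data : String) (key : String) : Prop := key.toList ≠ [] ∨ data.toList = []
instance (data : String) (key : String) : Decidable (Pre_m_crypt data key) := by unfold Pre_m_crypt; infer_instance
def pvWitness_m_crypt : String × String := ("abcde", "k3y")

def Spec_m_crypt (data : String) (key : String) (out : String) : Prop := out = m_crypt_alt data key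
instance (data : String) (key : String) (out : String) : Decidable (Spec_m_crypt data key out) := by unfold Spec_m_crypt; infer_instance

-- ===== CLAIM (what is proved, stated in full; the proofs are below) =====
def Claim_equal_m_crypt : Prop := ∀ (data : String) (key : String), Dom_m_crypt data key → Pre_m_crypt data key → Spec_m_crypt data key (m_crypt data key)

-- ===== LEMMAS AND PROOFS =====

-- the byte both programs compute for a character c whose in-group index is j
def pvG (kl : List Char) (j : Int) (c : Char) : Int :=
  PySem.Int.mod ((c.toNat : Int)
    + ((PySem.List.pyGetD kl (PySem.Int.mod j (PySem.List.len kl)) ' ').toNat : Int)) 256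

-- reference byte list: chunked recursion, four characters at a time
def pvE (kl : List Char) : List Char → List Int
  | [] => []
  | c :: rest =>
      ((PySem.List.enumerate ((c :: rest).take 4)).map (fun pc => pvG kl (PySem.Int.mod pc.1 4) pc.2))
        ++ pvE kl ((c :: rest).drop 4)
  termination_by l => l.length
  decreasing_by simp

-- A's byte list (the foldl of the port, verbatim)
def pvA (kl : List Char) (dl : List Char) : List Int :=
  (PySem.List.pyRange 0 (PySem.List.len dl) 4).foldl (fun acc i =>
    acc ++ ((PySem.List.pyRange 0 (PySem.List.len (PySem.List.slice dl (some i) (some (i + 4)))) 1).foldl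
      (fun eg j =>
        eg ++ [PySem.Int.mod (((PySem.List.pyGetD (PySem.List.slice dl (some i) (some (i + 4))) j ' ').toNat : Int)
                + ((PySem.List.pyGetD kl (PySem.Int.mod j (PySem.List.len kl)) ' ').toNat : Int)) 256]) [])) []

-- B's byte list
def pvB (kl : List Char) (dl : List Char) : List Int :=
  (PySem.List.enumerate dl).map (fun pc => pvG kl (PySem.Int.mod pc.1 4) pc.2)

-- one group of A, raw form
def pvGroup (kl g : List Char) : List Int :=
  (PySem.List.pyRange 0 (PySem.List.len g) 1).map (fun j => pvG kl j (PySem.List.pyGetD g j ' '))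

-- A's outer foldl over range(0, n, 4) as a flatMap over group numbers
theorem pvA_flatMap (kl dl : List Char) :
    pvA kl dl = (List.range ((dl.length + 3) / 4)).flatMap
      (fun k => pvGroup kl ((dl.drop (4 * k)).take 4)) := by
  unfold pvA
  rw [PySem.List.foldl_append_eq_flatMap]
  simp only [PySem.List.foldl_append_singleton_eq_map, List.nil_append]
  rw [PySem.List.pyRange_of_pos _ _ (by norm_num : (0:Int) < 4)]
  rw [List.flatMap_map]
  have hM : (if (0:Int) < PySem.List.len dl then (((PySem.List.len dl) - 0 + 4 - 1) / 4).toNat else 0)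
      = (dl.length + 3) / 4 := by
    simp only [PySem.List.len_eq]
    by_cases h : dl.length = 0
    · simp [h]
    · rw [if_pos (by exact_mod_cast Nat.pos_of_ne_zero h)]
      have : ((dl.length : Int) - 0 + 4 - 1) = ((dl.length + 3 : Nat) : Int) := by push_cast; ring
      rw [this, show (4:Int) = ((4:Nat):Int) by norm_num, ← Int.natCast_div, Int.toNat_natCast]
  rw [hM]
  congr 1
  funext k
  have h1 : (0 + 4 * ((k:Nat):Int)) = ((4 * k : Nat) : Int) := by push_cast; ring
  rw [h1]
  rw [show ((4 * k : Nat) : Int) + 4 = ((4 * k : Nat) : Int) + ((4:Nat) : Int) from by norm_num,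
    PySem.List.slice_natCast_add]
  rfl

-- a group of at most four characters, re-read as an enumerate-map (in-group index j = j % 4)
theorem pvGroup_enum (kl g : List Char) (hg : g.length ≤ 4) :
    pvGroup kl g = (PySem.List.enumerate g).map (fun pc => pvG kl (PySem.Int.mod pc.1 4) pc.2) := by
  rw [pvGroup, PySem.List.enumerate_eq_map_pyRange g ' ', List.map_map]
  apply List.map_congr_left
  intro j hj
  have hmem := PySem.List.mem_pyRange_one.mp hj
  simp only [PySem.List.len_eq] at hmem
  have h4 : j < 4 := lt_of_lt_of_le hmem.2 (by exact_mod_cast hg)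
  have h' : j % 4 = j := Int.emod_eq_of_lt hmem.1 h4
  simp [h']

theorem pvA_eq_pvE (kl dl : List Char) : pvA kl dl = pvE kl dl := by
  induction dl using pvE.induct with
  | case1 => rw [pvA_flatMap]; simp [pvE]
  | case2 c rest ih =>
      rw [pvA_flatMap, pvE]
      have hm : ((c :: rest).length + 3) / 4 = (((c :: rest).drop 4).length + 3) / 4 + 1 := by
        simp only [List.length_cons, List.length_drop]; omega
      rw [hm, List.range_succ_eq_map, List.flatMap_cons, List.flatMap_map]
      congr 1
      · rw [Nat.mul_zero, List.drop_zero]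
        exact pvGroup_enum kl _ (by rw [List.length_take]; omega)
      · rw [pvA_flatMap] at ih
        rw [← ih]
        congr 1
        funext k
        rw [List.drop_drop, show (4 + 4 * k) = 4 * Nat.succ k from by omega]

theorem pvMod4_shift (s : Int) : PySem.Int.mod (s + 4) 4 = PySem.Int.mod s 4 := by
  rw [PySem.Int.mod_eq_emod_of_pos (by norm_num), PySem.Int.mod_eq_emod_of_pos (by norm_num)]
  exact Int.add_emod_right s 4

-- the byte of a character depends on its position only through p % 4
theorem pvShift (kl : List Char) (l : List Char) : ∀ (s : Int),
    (PySem.List.enumerate l (s + 4)).map (fun pc => pvG kl (PySem.Int.mod pc.1 4) pc.2)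
      = (PySem.List.enumerate l s).map (fun pc => pvG kl (PySem.Int.mod pc.1 4) pc.2) := by
  induction l with
  | nil => intro s; simp [PySem.List.enumerate_nil]
  | cons x xs ih =>
      intro s
      rw [PySem.List.enumerate_cons, PySem.List.enumerate_cons, List.map_cons, List.map_cons]
      have h1 : s + 4 + 1 = (s + 1) + 4 := by ring
      rw [pvMod4_shift, h1, ih (s + 1)]

theorem pvB_eq_pvE (kl dl : List Char) : pvB kl dl = pvE kl dl := by
  induction dl using pvE.induct with
  | case1 => simp [pvB, pvE, PySem.List.enumerate_nil]
  | case2 c rest ih =>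
      have hsplit : c :: rest = (c :: rest).take 4 ++ (c :: rest).drop 4 :=
        (List.take_append_drop 4 (c :: rest)).symm
      show pvB kl (c :: rest) = pvE kl (c :: rest)
      rw [pvE]
      conv_lhs => rw [pvB, hsplit]
      rw [PySem.List.enumerate_append, List.map_append]
      congr 1
      by_cases h4 : 4 ≤ (c :: rest).length
      · have hlen : ((c :: rest).take 4).length = 4 := by rw [List.length_take]; omega
        rw [hlen]
        have h04 : (0 : Int) + ((4:Nat) : Int) = 0 + 4 := by norm_num
        rw [h04, pvShift kl _ 0]
        exact ih
      · have hd : (c :: rest).drop 4 = [] := by apply List.drop_eq_nil_of_le; omega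
        rw [hd]
        simp [PySem.List.enumerate_nil, pvE]

theorem m_crypt_as_pvA (data key : String) :
    m_crypt data key = PySem.Str.join "" ((pvA key.toList data.toList).map pvByteHex) := rfl

theorem m_crypt_alt_as_pvB (data key : String) :
    m_crypt_alt data key = PySem.Str.join "" ((pvB key.toList data.toList).map pvByteHex) := by
  simp only [m_crypt_alt, pvB, pvG, List.map_map]
  rfl

-- ===== VERDICT (by name: the statement is the Claim_ definition above) =====
theorem m_crypt_spec : Claim_equal_m_crypt := by
  intro data key _ _
  show m_crypt data key = m_crypt_alt data key
  rw [m_crypt_as_pvA, m_crypt_alt_as_pvB, pvA_eq_pvE, pvB_eq_pvE]
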